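-- pv_equiv track=rewrite | github.com/LatentWeaver/discount-tire-recommendation-system | scripts/inference.py | resolve_tire_titles
-- ===== SOURCE A (Python) =====
-- def resolve_tire_titles(
--     titles: list[str],
--     tire_map: dict[str, int],
-- ) -> tuple[list[int], list[str]]:
--     """Map free-form tire titles → tire indices.
--
--     Tries exact match first, then case-insensitive substring match. Returns
--     (resolved_indices, unresolved_inputs).
--     """
--     catalog_lower = {t.lower(): i for t, i in tire_map.items()}
--     resolved: list[int] = []
--     unresolved: list[str] = []
--     for raw in titles:
--         s = raw.strip()
--         if not s:
--             continue
--         if s in tire_map: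
--             resolved.append(tire_map[s])
--             continue
--         low = s.lower()
--         hit = catalog_lower.get(low)
--         if hit is not None:
--             resolved.append(hit)
--             continue
--         # Substring fallback — pick the shortest matching catalog title to
--         # avoid runaway prefix collisions.
--         candidates = [
--             (t, i) for t_low, i in catalog_lower.items()
--             for t in [next(k for k in tire_map if k.lower() == t_low)]
--             if low in t_low
--         ]
--         if candidates:
--             t, i = min(candidates, key=lambda ti: len(ti[0]))
--             resolved.append(i)
--         else:
--             unresolved.append(raw)
--     # De-dupe while preserving order.
--     seen: set[int] = set()
--     deduped = [x for x in resolved if not (x in seen or seen.add(x))]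
--     return deduped, unresolved
-- ===== SOURCE B (Python) =====
-- def resolve_tire_titles(
--     titles: list[str],
--     tire_map: dict[str, int],
-- ) -> tuple[list[int], list[str]]:
--     """Map free-form tire titles -> tire indices (exact value as A)."""
--     catalog_lower: dict[str, int] = {}
--     first_orig: dict[str, str] = {}
--     for t, i in tire_map.items():
--         tl = t.lower()
--         if tl not in first_orig:
--             first_orig[tl] = t
--         catalog_lower[tl] = i
--     # catalog entries sorted (stably) by the length of the first original
--     # title carrying that lowercase key: the first containing match in this
--     # order is the shortest match with earliest-insertion tie-breaking.
--     by_len = sorted(catalog_lower.items(), key=lambda p: len(first_orig[p[0]]))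
--     resolved: list[int] = []
--     seen: set[int] = set()
--     unresolved: list[str] = []
--     for raw in titles:
--         s = raw.strip()
--         if not s:
--             continue
--         if s in tire_map:
--             idx = tire_map[s]
--         else:
--             low = s.lower()
--             idx = catalog_lower.get(low)
--             if idx is None:
--                 for tl, i in by_len:
--                     if low in tl:
--                         idx = i
--                         break
--                 if idx is None:
--                     unresolved.append(raw)
--                     continue
--         if idx not in seen:
--             seen.add(idx)
--             resolved.append(idx)
--     return resolved, unresolved
-- ===== Notes on version B (the rewrite author's own statement) =====
-- stated objective: faster
-- what changed: B precomputes the first-original-title per lowercase key and a catalog list sorted once by that title's length, so the substring fallback becomes a single first-match scan with early break instead of rebuilding a candidate list (with a per-candidate key re-scan) and taking min per title; the final order-preserving de-dupe is fused into the main loop with a seen set.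
import Mathlib
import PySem

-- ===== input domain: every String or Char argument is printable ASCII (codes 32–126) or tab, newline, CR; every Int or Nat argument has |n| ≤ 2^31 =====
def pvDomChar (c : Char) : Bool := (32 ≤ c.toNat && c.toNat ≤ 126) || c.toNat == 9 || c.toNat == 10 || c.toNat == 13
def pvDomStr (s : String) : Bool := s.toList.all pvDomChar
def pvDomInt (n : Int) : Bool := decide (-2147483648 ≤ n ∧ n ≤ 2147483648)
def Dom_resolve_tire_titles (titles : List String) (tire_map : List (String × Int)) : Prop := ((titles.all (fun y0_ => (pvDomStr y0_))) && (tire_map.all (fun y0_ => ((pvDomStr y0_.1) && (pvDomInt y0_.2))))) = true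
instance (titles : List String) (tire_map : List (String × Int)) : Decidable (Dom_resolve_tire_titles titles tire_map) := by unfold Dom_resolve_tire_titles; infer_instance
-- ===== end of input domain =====

-- B replaces A's per-title candidate-list + min fallback by one catalog list
-- pre-sorted by title length (first containing match) and fuses the final
-- de-dupe into the main loop; same return value (objective: alternative).

-- ===== PORT A =====
-- next(k for k in tire_map if k.lower() == t_low); the generator never raises
-- StopIteration because t_low is always the lowering of some key, so the
-- `.getD ""` default is never used.
def pvFirstKey (keys : List String) (tlow : String) : String :=
  (keys.find? (fun k => PySem.Str.lower k == tlow)).getD ""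

def resolve_tire_titles (titles : List String) (tire_map : List (String × Int)) : List Int × List String :=
  let tm := PySem.Dict.ofList tire_map
  let catalog_lower := tm.items.foldl
    (fun (d : PySem.Dict String Int) p => d.insert (PySem.Str.lower p.1) p.2) PySem.Dict.empty
  let ru := titles.foldl (fun (acc : List Int × List String) raw =>
    let s := PySem.Str.strip raw
    if s.toList.isEmpty then acc
    else if tm.contains s then (acc.1 ++ [tm.getD s 0], acc.2)
    else
      let low := PySem.Str.lower s
      match catalog_lower.get? low with
      | some hit => (acc.1 ++ [hit], acc.2)
      | none =>
        let candidates := (catalog_lower.items.filter (fun q => PySem.Str.isIn low q.1)).map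
          (fun q => (pvFirstKey tm.keys q.1, q.2))
        match PySem.List.min? candidates (fun ti => PySem.Str.len ti.1) with
        | some ti => (acc.1 ++ [ti.2], acc.2)
        | none => (acc.1, acc.2 ++ [raw])) ([], [])
  -- de-dupe while preserving order (seen-set comprehension)
  let dd := ru.1.foldl (fun (st : PySem.Set Int × List Int) x =>
      if PySem.Set.contains st.1 x then st else (PySem.Set.add st.1 x, st.2 ++ [x]))
    (PySem.Set.empty, [])
  (dd.2, ru.2)

-- ===== PORT B =====
def resolve_tire_titles_alt (titles : List String) (tire_map : List (String × Int)) : List Int × List String :=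
  let tm := PySem.Dict.ofList tire_map
  let cf := tm.items.foldl
    (fun (d : PySem.Dict String Int × PySem.Dict String String) p =>
      (d.1.insert (PySem.Str.lower p.1) p.2,
       if d.2.contains (PySem.Str.lower p.1) then d.2
       else d.2.insert (PySem.Str.lower p.1) p.1))
    (PySem.Dict.empty, PySem.Dict.empty)
  let catalog_lower := cf.1
  let first_orig := cf.2
  let by_len := PySem.List.sorted catalog_lower.items
    (fun q => PySem.Str.len (first_orig.getD q.1 "")) false
  let st := titles.foldl (fun (acc : List Int × PySem.Set Int × List String) raw =>
    let s := PySem.Str.strip raw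
    if s.toList.isEmpty then acc
    else
      let idx? : Option Int :=
        if tm.contains s then some (tm.getD s 0)
        else
          let low := PySem.Str.lower s
          match catalog_lower.get? low with
          | some hit => some hit
          | none => (by_len.find? (fun q => PySem.Str.isIn low q.1)).map (·.2)
      match idx? with
      | none => (acc.1, acc.2.1, acc.2.2 ++ [raw])
      | some i =>
        if PySem.Set.contains acc.2.1 i then acc
        else (acc.1 ++ [i], PySem.Set.add acc.2.1 i, acc.2.2))
    ([], PySem.Set.empty, [])
  (st.1, st.2.2)

-- ===== PRECONDITION & SPEC =====
def Spec_resolve_tire_titles (titles : List String) (tire_map : List (String × Int)) (out : List Int × List String) : Prop := out = resolve_tire_titles_alt titles tire_map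
instance (titles : List String) (tire_map : List (String × Int)) (out : List Int × List String) : Decidable (Spec_resolve_tire_titles titles tire_map out) := by unfold Spec_resolve_tire_titles; infer_instance

-- ===== CLAIM (what is proved, stated in full; the proofs are below) =====
def Claim_equal_resolve_tire_titles : Prop := ∀ (titles : List String) (tire_map : List (String × Int)), Dom_resolve_tire_titles titles tire_map → Spec_resolve_tire_titles titles tire_map (resolve_tire_titles titles tire_map)

-- ===== LEMMAS AND PROOFS =====

-- per-title outcome: none = blank (skipped), some none = unresolved,
-- some (some i) = resolved to i; `fb` is the substring fallback on the lowered title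
def pvOut (tm cat : PySem.Dict String Int) (fb : String → Option Int) (raw : String) :
    Option (Option Int) :=
  if (PySem.Str.strip raw).toList.isEmpty then none
  else if tm.contains (PySem.Str.strip raw) then
    some (some (tm.getD (PySem.Str.strip raw) 0))
  else
    match cat.get? (PySem.Str.lower (PySem.Str.strip raw)) with
    | some hit => some (some hit)
    | none =>
      match fb (PySem.Str.lower (PySem.Str.strip raw)) with
      | some i => some (some i)
      | none => some none

theorem pv_min?_map {α β : Type} (f : α → β) (key : β → Int) (xs : List α) :
    PySem.List.min? (xs.map f) key = (PySem.List.min? xs (fun x => key (f x))).map f := by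
  unfold PySem.List.min?
  rw [List.foldl_map]
  suffices h : ∀ (a : Option α),
      xs.foldl (fun acc x => match acc with
        | none => some (f x)
        | some m => if key (f x) < key m then some (f x) else some m) (a.map f) =
      (xs.foldl (fun acc x => match acc with
        | none => some x
        | some m => if key (f x) < key (f m) then some x else some m) a).map f by
    simpa using h none
  induction xs with
  | nil => intro a; rfl
  | cons x xs ih =>
    intro a
    cases a with
    | none => simpa using ih (some x)
    | some m =>
      by_cases h : key (f x) < key (f m)
      · simp only [Option.map_some, List.foldl_cons, h, if_true]
        simpa using ih (some x)
      · simp only [Option.map_some, List.foldl_cons, h, if_false]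
        simpa using ih (some m)

theorem pv_dedupe (r : List Int) (s : PySem.Set Int) :
    (r.foldl (fun (st : PySem.Set Int × List Int) x =>
      if PySem.Set.contains st.1 x then st else (PySem.Set.add st.1 x, st.2 ++ [x])) (s, s)).2 =
      r.foldl PySem.Set.add s := by
  induction r generalizing s with
  | nil => rfl
  | cons x r ih =>
    by_cases h : PySem.Set.contains s x
    · have ha : PySem.Set.add s x = s := by simp only [PySem.Set.add, h, if_true]
      simp only [List.foldl_cons, h, if_true, ha]
      exact ih s
    · have ha : PySem.Set.add s x = s ++ [x] := by simp only [PySem.Set.add, h, Bool.false_eq_true, if_false]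
      simp only [List.foldl_cons, h, Bool.false_eq_true, if_false, ha]
      exact ih (s ++ [x])

theorem pv_find?_insertBy {α : Type} (k : α → Int) (p : α → Bool) (x : α) (s : List α)
    (hs : s.Pairwise (fun a b => k a ≤ k b)) :
    (PySem.List.insertBy (fun a b => decide (k a < k b)) x s).find? p =
      (if p x then
        (match s.find? p with
         | none => some x
         | some m => if k x < k m then some x else some m)
       else s.find? p) := by
  induction s with
  | nil =>
    by_cases hp : p x <;> simp [PySem.List.insertBy, List.find?, hp]
  | cons y ys ih =>
    have hys := (List.pairwise_cons.mp hs).2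
    have hy := (List.pairwise_cons.mp hs).1
    by_cases hxy : k x < k y
    · simp only [PySem.List.insertBy, hxy, decide_true, if_true]
      by_cases hp : p x
      · rw [if_pos hp, List.find?_cons_of_pos hp]
        cases hfy : List.find? p (y :: ys) with
        | none => rfl
        | some m =>
          have hm := List.mem_of_find?_eq_some hfy
          have hkm : k y ≤ k m := by
            rcases List.mem_cons.mp hm with h | h
            · simp [h]
            · exact hy m h
          simp only []
          rw [if_pos (lt_of_lt_of_le hxy hkm)]
      · rw [if_neg hp, List.find?_cons_of_neg (by simp [hp])]
    · simp only [PySem.List.insertBy, hxy, decide_false, Bool.false_eq_true, if_false]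
      by_cases hpy : p y
      · simp only [List.find?_cons_of_pos hpy]
        by_cases hp : p x <;> simp [hp, hxy]
      · rw [List.find?_cons_of_neg (by simp [hpy]), List.find?_cons_of_neg (by simp [hpy])]
        exact ih hys

theorem pv_min_filter_eq_find_sorted {α : Type} (k : α → Int) (p : α → Bool) (l : List α) :
    PySem.List.min? (l.filter p) k = (PySem.List.sorted l k false).find? p := by
  induction l using List.reverseRecOn with
  | nil => rfl
  | append_singleton l x ih =>
    have hsort : PySem.List.sorted (l ++ [x]) k false =
        PySem.List.insertBy (fun a b => decide (k a < k b)) x (PySem.List.sorted l k false) := by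
      rw [PySem.List.sorted_eq_foldl_insertBy, PySem.List.sorted_eq_foldl_insertBy,
        List.foldl_append]
      rfl
    rw [hsort, pv_find?_insertBy k p x _ (PySem.List.sorted_pairwise l k), ← ih,
      List.filter_append]
    by_cases hp : p x
    · simp only [List.filter_cons, List.filter_nil, hp, if_true]
      simp only [PySem.List.min?, List.foldl_append, List.foldl_cons, List.foldl_nil]
      cases (l.filter p).foldl (fun acc y => match acc with
        | none => some y
        | some m => if k y < k m then some y else some m) none <;> rfl
    · simp [hp]

theorem pv_firstOrig_getD (items : List (String × Int)) (d : PySem.Dict String String)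
    (tl : String) :
    ((items.foldl (fun d p => if d.contains (PySem.Str.lower p.1) then d
        else d.insert (PySem.Str.lower p.1) p.1) d).getD tl "") =
      (if d.contains tl then d.getD tl ""
       else ((items.find? (fun p => PySem.Str.lower p.1 == tl)).map (·.1)).getD "") := by
  induction items generalizing d with
  | nil =>
    by_cases hd : d.contains tl
    · simp [hd]
    · simp [hd, PySem.Dict.getD_of_not_contains d "" (by simpa using hd)]
  | cons p items ih =>
    simp only [List.foldl_cons]
    rw [ih]
    by_cases hl : PySem.Str.lower p.1 = tl
    · by_cases hd : d.contains tl
      · rw [hl, if_pos hd, if_pos hd, if_pos hd]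
      · rw [hl, if_neg hd]
        have h1 : (d.insert tl p.1).contains tl = true := PySem.Dict.contains_insert_self d tl p.1
        rw [if_pos h1, PySem.Dict.getD_insert_self, if_neg hd,
          List.find?_cons_of_pos (by simp [hl])]
        rfl
    · have hne : tl ≠ PySem.Str.lower p.1 := fun h => hl h.symm
      have hfind : List.find? (fun p => PySem.Str.lower p.1 == tl) (p :: items) =
          List.find? (fun p => PySem.Str.lower p.1 == tl) items :=
        List.find?_cons_of_neg (by simp [hl])
      by_cases hc : d.contains (PySem.Str.lower p.1)
      · rw [if_pos hc, hfind]
      · rw [if_neg hc]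
        have h2 : (d.insert (PySem.Str.lower p.1) p.1).contains tl = d.contains tl := by
          rw [PySem.Dict.contains_insert]
          simp [hne]
        rw [h2, hfind]
        by_cases hd : d.contains tl
        · rw [if_pos hd, if_pos hd, PySem.Dict.getD_insert_of_ne d _ _ hne]
        · rw [if_neg hd, if_neg hd]

def pvFbA (tm cat : PySem.Dict String Int) (low : String) : Option Int :=
  (PySem.List.min? ((cat.items.filter (fun q => PySem.Str.isIn low q.1)).map
      (fun q => (pvFirstKey tm.keys q.1, q.2)))
    (fun ti => PySem.Str.len ti.1)).map (·.2)

def pvFbB (byLen : List (String × Int)) (low : String) : Option Int :=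
  (byLen.find? (fun q => PySem.Str.isIn low q.1)).map (·.2)

theorem pv_fb_eq (tm cat : PySem.Dict String Int) (fo : PySem.Dict String String)
    (hfo : ∀ tl, fo.getD tl "" = pvFirstKey tm.keys tl) (low : String) :
    pvFbA tm cat low =
      pvFbB (PySem.List.sorted cat.items (fun q => PySem.Str.len (fo.getD q.1 "")) false) low := by
  unfold pvFbA pvFbB
  rw [pv_min?_map]
  have hk : (fun q : String × Int => PySem.Str.len (fo.getD q.1 "")) =
      (fun q : String × Int => PySem.Str.len (pvFirstKey tm.keys q.1)) := by
    funext q; rw [hfo]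
  rw [hk, ← pv_min_filter_eq_find_sorted]
  cases PySem.List.min? (cat.items.filter (fun q => PySem.Str.isIn low q.1))
      (fun q => PySem.Str.len (pvFirstKey tm.keys q.1)) with
  | none => simp
  | some m => simp

theorem pv_foldA_gen (h : String → Option (Option Int))
    (step : List Int × List String → String → List Int × List String)
    (hstep : ∀ r u raw, step (r, u) raw =
      (match h raw with
       | none => (r, u)
       | some none => (r, u ++ [raw])
       | some (some i) => (r ++ [i], u))) :
    ∀ (titles : List String) (r : List Int) (u : List String),
      titles.foldl step (r, u) =
        (r ++ titles.filterMap (fun raw => (h raw).bind id),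
         u ++ titles.filter (fun raw => h raw == some none)) := by
  intro titles
  induction titles with
  | nil => intro r u; simp
  | cons raw titles ih =>
    intro r u
    rw [List.foldl_cons, hstep]
    cases hr : h raw with
    | none => simp [hr, ih r u]
    | some o =>
      cases o with
      | none => simp [hr, ih r (u ++ [raw])]
      | some i => simp [hr, ih (r ++ [i]) u]

theorem pv_foldB_gen (h : String → Option (Option Int))
    (step : List Int × PySem.Set Int × List String → String →
      List Int × PySem.Set Int × List String)
    (hstep : ∀ (l : List Int) (s : PySem.Set Int) (u : List String) raw, step (l, s, u) raw =
      (match h raw with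
       | none => (l, s, u)
       | some none => (l, s, u ++ [raw])
       | some (some i) =>
         if PySem.Set.contains s i then (l, s, u)
         else (l ++ [i], PySem.Set.add s i, u))) :
    ∀ (titles : List String) (s : PySem.Set Int) (u : List String),
      titles.foldl step (s, s, u) =
        ((titles.filterMap (fun raw => (h raw).bind id)).foldl PySem.Set.add s,
         (titles.filterMap (fun raw => (h raw).bind id)).foldl PySem.Set.add s,
         u ++ titles.filter (fun raw => h raw == some none)) := by
  intro titles
  induction titles with
  | nil => intro s u; simp
  | cons raw titles ih =>
    intro s u
    rw [List.foldl_cons, hstep]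
    cases hr : h raw with
    | none => simp [hr, ih s u]
    | some o =>
      cases o with
      | none => simp [hr, ih s (u ++ [raw])]
      | some i =>
        by_cases hc : PySem.Set.contains s i
        · have ha : PySem.Set.add s i = s := by
            simp only [PySem.Set.add, hc, if_true]
          simp only [hc, if_true]
          simp [hr, ih s u, ha]
        · have ha : PySem.Set.add s i = s ++ [i] := by
            simp only [PySem.Set.add, hc, Bool.false_eq_true, if_false]
          simp only [hc, Bool.false_eq_true, if_false]
          rw [ha]
          simp [hr, ih (s ++ [i]) u, ha]

theorem pv_fo_spec (tm : PySem.Dict String Int) (tl : String) :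
    ((tm.items.foldl (fun d p => if d.contains (PySem.Str.lower p.1) then d
        else d.insert (PySem.Str.lower p.1) p.1) PySem.Dict.empty).getD tl "") =
      pvFirstKey tm.keys tl := by
  rw [pv_firstOrig_getD, if_neg (by simp [PySem.Dict.contains_empty])]
  unfold pvFirstKey
  simp only [PySem.Dict.keys, List.find?_map]
  rfl

theorem pv_main (titles : List String) (tire_map : List (String × Int)) :
    resolve_tire_titles titles tire_map = resolve_tire_titles_alt titles tire_map := by
  simp only [resolve_tire_titles, resolve_tire_titles_alt]
  rw [PySem.List.foldl_prod_mk
    (f := fun (d : PySem.Dict String Int) (p : String × Int) =>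
      d.insert (PySem.Str.lower p.1) p.2)
    (g := fun (d : PySem.Dict String String) (p : String × Int) =>
      if d.contains (PySem.Str.lower p.1) then d else d.insert (PySem.Str.lower p.1) p.1)]
  set tm := PySem.Dict.ofList tire_map with htm
  set cat := tm.items.foldl (fun (d : PySem.Dict String Int) p =>
    d.insert (PySem.Str.lower p.1) p.2) PySem.Dict.empty with hcat
  set fo := tm.items.foldl (fun (d : PySem.Dict String String) p =>
    if d.contains (PySem.Str.lower p.1) then d else d.insert (PySem.Str.lower p.1) p.1)
    PySem.Dict.empty with hfo'
  have hfo : ∀ tl, fo.getD tl "" = pvFirstKey tm.keys tl := fun tl => pv_fo_spec tm tl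
  set byLen := PySem.List.sorted cat.items
    (fun q => PySem.Str.len (fo.getD q.1 "")) false with hbl
  have hfb : pvFbA tm cat = fun low => pvFbB byLen low :=
    funext fun low => pv_fb_eq tm cat fo hfo low
  have hstepA : ∀ r u raw,
      (fun (acc : List Int × List String) raw =>
        let s := PySem.Str.strip raw
        if s.toList.isEmpty then acc
        else if tm.contains s then (acc.1 ++ [tm.getD s 0], acc.2)
        else
          let low := PySem.Str.lower s
          match cat.get? low with
          | some hit => (acc.1 ++ [hit], acc.2)
          | none =>
            let candidates := (cat.items.filter (fun q => PySem.Str.isIn low q.1)).map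
              (fun q => (pvFirstKey tm.keys q.1, q.2))
            match PySem.List.min? candidates (fun ti => PySem.Str.len ti.1) with
            | some ti => (acc.1 ++ [ti.2], acc.2)
            | none => (acc.1, acc.2 ++ [raw])) (r, u) raw =
      (match pvOut tm cat (pvFbA tm cat) raw with
       | none => (r, u)
       | some none => (r, u ++ [raw])
       | some (some i) => (r ++ [i], u)) := by
    intro r u raw
    dsimp only
    simp only [pvOut, pvFbA]
    by_cases h1 : (PySem.Str.strip raw).toList.isEmpty = true
    · rw [if_pos h1, if_pos h1]
    · rw [if_neg h1, if_neg h1]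
      by_cases h2 : tm.contains (PySem.Str.strip raw) = true
      · rw [if_pos h2, if_pos h2]
      · rw [if_neg h2, if_neg h2]
        cases h3 : cat.get? (PySem.Str.lower (PySem.Str.strip raw)) with
        | some hit => rfl
        | none =>
          cases h4 : PySem.List.min?
              ((cat.items.filter
                  (fun q => PySem.Str.isIn (PySem.Str.lower (PySem.Str.strip raw)) q.1)).map
                (fun q => (pvFirstKey tm.keys q.1, q.2)))
              (fun ti => PySem.Str.len ti.1) with
          | some ti => rfl
          | none => rfl
  have hstepB : ∀ (l : List Int) (s : PySem.Set Int) (u : List String) raw,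
      (fun (acc : List Int × PySem.Set Int × List String) raw =>
        let s := PySem.Str.strip raw
        if s.toList.isEmpty then acc
        else
          let idx? : Option Int :=
            if tm.contains s then some (tm.getD s 0)
            else
              let low := PySem.Str.lower s
              match cat.get? low with
              | some hit => some hit
              | none => (byLen.find? (fun q => PySem.Str.isIn low q.1)).map (·.2)
          match idx? with
          | none => (acc.1, acc.2.1, acc.2.2 ++ [raw])
          | some i =>
            if PySem.Set.contains acc.2.1 i then acc
            else (acc.1 ++ [i], PySem.Set.add acc.2.1 i, acc.2.2)) (l, s, u) raw =
      (match pvOut tm cat (pvFbA tm cat) raw with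
       | none => (l, s, u)
       | some none => (l, s, u ++ [raw])
       | some (some i) =>
         if PySem.Set.contains s i then (l, s, u)
         else (l ++ [i], PySem.Set.add s i, u)) := by
    intro l s u raw
    dsimp only
    simp only [pvOut, hfb, pvFbB]
    by_cases h1 : (PySem.Str.strip raw).toList.isEmpty = true
    · rw [if_pos h1, if_pos h1]
    · rw [if_neg h1, if_neg h1]
      by_cases h2 : tm.contains (PySem.Str.strip raw) = true
      · rw [if_pos h2, if_pos h2]
      · rw [if_neg h2, if_neg h2]
        cases h3 : cat.get? (PySem.Str.lower (PySem.Str.strip raw)) with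
        | some hit => rfl
        | none =>
          cases h4 : byLen.find?
              (fun q => PySem.Str.isIn (PySem.Str.lower (PySem.Str.strip raw)) q.1) with
          | some q => simp only [Option.map_some]
          | none => rfl
  rw [pv_foldA_gen (pvOut tm cat (pvFbA tm cat)) _ hstepA titles [] []]
  dsimp only
  simp only [List.nil_append]
  rw [show (PySem.Set.empty : PySem.Set Int) = ([] : List Int) from rfl]
  rw [pv_dedupe (List.filterMap
      (fun raw => (pvOut tm cat (pvFbA tm cat) raw).bind id) titles) ([] : List Int)]
  rw [show (([] : List Int), ([] : PySem.Set Int), ([] : List String)) =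
    ((([] : List Int) : PySem.Set Int), (([] : List Int) : PySem.Set Int), ([] : List String)) from rfl]
  rw [pv_foldB_gen (pvOut tm cat (pvFbA tm cat)) _ hstepB titles ([] : List Int) []]
  dsimp only
  simp only [List.nil_append]

-- ===== VERDICT (by name: the statement is the Claim_ definition above) =====
theorem resolve_tire_titles_spec : Claim_equal_resolve_tire_titles := by
  intro titles tire_map _
  unfold Spec_resolve_tire_titles
  exact pv_main titles tire_map
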